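-- pv_equiv track=rewrite | github.com/MrBrantCode/unitest_baseline | mut_generate/mist_train_cf/cf_39309/solution.py | find_highest_versions
-- ===== SOURCE A (Python) =====
-- from typing import List, Tuple, Dict
--
-- def find_highest_versions(file_list: List[Tuple[str, int]]) -> Dict[str, int]:
--     highest_versions = {}
--     for file, version in file_list:
--         if file in highest_versions:
--             highest_versions[file] = max(highest_versions[file], version)
--         else:
--             highest_versions[file] = version
--     return highest_versions
-- ===== SOURCE B (Python) =====
-- def find_highest_versions(file_list):
--     # Two passes: group versions per filename, then reduce each group with max.
--     groups = {}
--     for file, version in file_list: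
--         groups.setdefault(file, []).append(version)
--     result = {}
--     for file, versions in groups.items():
--         result[file] = max(versions)
--     return result
-- ===== Notes on version B (the rewrite author's own statement) =====
-- stated objective: alternative
-- what changed: Replaces the single-pass running-max dict update with a two-pass populate-then-reduce: first group all versions per filename into lists, then take max of each group.
import Mathlib
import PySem

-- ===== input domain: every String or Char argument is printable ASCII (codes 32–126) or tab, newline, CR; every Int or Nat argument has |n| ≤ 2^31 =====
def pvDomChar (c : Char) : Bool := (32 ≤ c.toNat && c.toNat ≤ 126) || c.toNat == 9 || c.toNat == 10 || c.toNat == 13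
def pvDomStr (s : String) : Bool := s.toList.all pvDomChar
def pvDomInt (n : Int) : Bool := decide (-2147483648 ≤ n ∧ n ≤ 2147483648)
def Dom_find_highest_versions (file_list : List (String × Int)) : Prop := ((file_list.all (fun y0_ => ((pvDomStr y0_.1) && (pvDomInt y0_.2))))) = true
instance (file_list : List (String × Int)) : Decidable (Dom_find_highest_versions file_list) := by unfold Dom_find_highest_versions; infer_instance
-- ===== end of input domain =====

-- B replaces A's single-pass running-max dict update by a two-pass grouping
-- (filename -> list of versions) followed by a max-reduction of each group
-- (objective: alternative decomposition, same O(n) dict passes).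

-- ===== PORT A =====
-- one running-max pass: d[file] = max(d[file], version) if present else version
def find_highest_versions (file_list : List (String × Int)) : List (String × Int) :=
  (file_list.foldl (fun d p =>
      if d.contains p.1 then d.insert p.1 (max (d.getD p.1 0) p.2)
      else d.insert p.1 p.2) PySem.Dict.empty).items

-- ===== PORT B =====
-- max(vs) for the nonempty lists B applies it to (Python max of a nonempty int list)
def pyMaxInt (vs : List Int) : Int := (PySem.List.max? vs (fun y => y)).getD 0

def find_highest_versions_alt (file_list : List (String × Int)) : List (String × Int) :=
  let groups := file_list.foldl
      (fun d p => d.modify p.1 [] (fun vs => vs ++ [p.2])) PySem.Dict.empty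
  (groups.items.foldl
      (fun d p => d.insert p.1 (pyMaxInt p.2)) PySem.Dict.empty).items

-- ===== PRECONDITION & SPEC =====
def Spec_find_highest_versions (file_list : List (String × Int)) (out : List (String × Int)) : Prop := out = find_highest_versions_alt file_list
instance (file_list : List (String × Int)) (out : List (String × Int)) : Decidable (Spec_find_highest_versions file_list out) := by unfold Spec_find_highest_versions; infer_instance

-- ===== CLAIM (what is proved, stated in full; the proofs are below) =====
def Claim_equal_find_highest_versions : Prop := ∀ (file_list : List (String × Int)), Dom_find_highest_versions file_list → Spec_find_highest_versions file_list (find_highest_versions file_list)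

-- ===== LEMMAS AND PROOFS =====

-- A's loop body, with the common insert factored out
def pvStepA (d : PySem.Dict String Int) (p : String × Int) : PySem.Dict String Int :=
  d.insert p.1 (if d.contains p.1 then max (d.getD p.1 0) p.2 else p.2)

-- running max over an Option accumulator
def pvOptMax (o : Option Int) (v : Int) : Option Int :=
  some (match o with | none => v | some m => max m v)

theorem pvStepA_eq :
    (fun (d : PySem.Dict String Int) (p : String × Int) =>
      if d.contains p.1 then d.insert p.1 (max (d.getD p.1 0) p.2)
      else d.insert p.1 p.2) = pvStepA := by
  funext d p
  by_cases h : d.contains p.1 <;> simp [pvStepA, h]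

theorem pvStepA_get?_self (d : PySem.Dict String Int) (p : String × Int) :
    (pvStepA d p).get? p.1 = pvOptMax (d.get? p.1) p.2 := by
  rw [pvStepA, PySem.Dict.get?_insert_self, PySem.Dict.contains_eq_isSome_get?,
      PySem.Dict.getD_eq_get?_getD]
  cases d.get? p.1 <;> simp [pvOptMax]

theorem pvA_get? (l : List (String × Int)) (d : PySem.Dict String Int) (k : String) :
    (l.foldl pvStepA d).get? k
      = ((l.filter (fun p => p.1 == k)).map (fun p => p.2)).foldl pvOptMax (d.get? k) := by
  induction l generalizing d with
  | nil => rfl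
  | cons p t ih =>
    rw [List.foldl_cons, ih]
    by_cases h : p.1 = k
    · have hb : (p.1 == k) = true := by simp [h]
      have h1 : (pvStepA d p).get? k = pvOptMax (d.get? k) p.2 := by
        rw [← h]; exact pvStepA_get?_self d p
      rw [h1, List.filter_cons, hb]
      simp
    · have hb : (p.1 == k) = false := by simp [h]
      have h1 : (pvStepA d p).get? k = d.get? k := by
        rw [pvStepA, PySem.Dict.get?_insert_of_ne d _ (fun hk => h (Eq.symm hk))]
      rw [h1, List.filter_cons, hb]
      simp

theorem pvFoldOptMax (t : List Int) (v : Int) :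
    t.foldl pvOptMax (some v) = some (t.foldl max v) := by
  induction t generalizing v with
  | nil => rfl
  | cons a t ih => simp [pvOptMax, ih]

theorem pvOptMax_of_ne_nil (vs : List Int) (h : vs ≠ []) :
    vs.foldl pvOptMax none = some (pyMaxInt vs) := by
  cases vs with
  | nil => exact absurd rfl h
  | cons v t =>
    rw [List.foldl_cons, show pvOptMax none v = some v from rfl, pvFoldOptMax,
        pyMaxInt, PySem.List.max?_id_cons]
    rfl

theorem find_highest_versions_spec' (l : List (String × Int)) :
    find_highest_versions l = find_highest_versions_alt l := by
  rw [show find_highest_versions l = (l.foldl pvStepA PySem.Dict.empty).items by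
        rw [find_highest_versions, pvStepA_eq]]
  show (l.foldl pvStepA PySem.Dict.empty).items =
    ((l.foldl (fun d p => d.modify p.1 [] (fun vs => vs ++ [p.2]))
        PySem.Dict.empty).items.foldl
      (fun d p => d.insert p.1 (pyMaxInt p.2)) PySem.Dict.empty).items
  set dA := l.foldl pvStepA PySem.Dict.empty with hdA
  set G := l.foldl (fun d p => d.modify p.1 [] (fun vs => vs ++ [p.2]))
      (PySem.Dict.empty : PySem.Dict String (List Int)) with hG0
  set R := G.items.foldl (fun d p => d.insert p.1 (pyMaxInt p.2))
      (PySem.Dict.empty : PySem.Dict String Int) with hR0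
  have hndA : dA.keys.Nodup :=
    PySem.Dict.nodup_keys_foldl_insert_key l (fun p : String × Int => p.1)
      (fun d p => if d.contains p.1 then max (d.getD p.1 0) p.2 else p.2)
      PySem.Dict.empty PySem.Dict.nodup_keys_empty
  have hndG : G.keys.Nodup :=
    PySem.Dict.nodup_keys_foldl_modify_key l (fun p : String × Int => p.1)
      ([] : List Int) (fun _ p vs => vs ++ [p.2])
      PySem.Dict.empty PySem.Dict.nodup_keys_empty
  have hkeys : dA.keys = G.keys := by
    have h1 := PySem.Dict.keys_foldl_insert_key l (fun p : String × Int => p.1)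
      (fun d p => if d.contains p.1 then max (d.getD p.1 0) p.2 else p.2)
      (PySem.Dict.empty : PySem.Dict String Int)
    have h2 := PySem.Dict.keys_foldl_modify_key l (fun p : String × Int => p.1)
      ([] : List Int) (fun _ p vs => vs ++ [p.2])
      (PySem.Dict.empty : PySem.Dict String (List Int))
    exact h1.trans h2.symm
  have hkeysG : G.keys = PySem.Set.ofList (l.map (fun p => p.1)) := by
    have h2 := PySem.Dict.keys_foldl_modify_key l (fun p : String × Int => p.1)
      ([] : List Int) (fun _ p vs => vs ++ [p.2])
      (PySem.Dict.empty : PySem.Dict String (List Int))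
    rw [PySem.Dict.keys_empty, PySem.Set.update_nil_left] at h2
    exact h2
  have e2 : R.items = G.items.map (fun p => (p.1, pyMaxInt p.2)) := by
    have h := PySem.Dict.items_foldl_insert_fresh G.items (fun p => p.1)
      (fun p => pyMaxInt p.2) PySem.Dict.empty
      (fun a _ => PySem.Dict.contains_empty _) hndG
    exact h.trans (List.nil_append _)
  have e1 : dA.items = dA.keys.map (fun k => (k, dA.getD k 0)) :=
    PySem.Dict.items_eq_map_keys dA hndA 0
  have e3 : G.items = G.keys.map (fun k => (k, G.getD k [])) :=
    PySem.Dict.items_eq_map_keys G hndG []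
  rw [e1, e2, e3, List.map_map, hkeys]
  apply List.map_congr_left
  intro k hk
  have hocc : ∃ p ∈ l, p.1 = k := by
    rw [hkeysG, PySem.Set.mem_ofList, List.mem_map] at hk
    exact hk
  have hGv : G.getD k [] = (l.filter (fun p => p.1 == k)).map (fun p => p.2) := by
    have h := PySem.Dict.getD_foldl_modify_append l
      (PySem.Dict.empty : PySem.Dict String (List Int)) k
    rwa [PySem.Dict.getD_empty, List.nil_append] at h
  have hne : (l.filter (fun p => p.1 == k)).map (fun p => p.2) ≠ [] := by
    rcases hocc with ⟨p, hp, hpk⟩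
    simp only [ne_eq, List.map_eq_nil_iff, List.filter_eq_nil_iff]
    intro h
    exact h p hp (by simp [hpk])
  have hval : dA.getD k 0 = pyMaxInt (G.getD k []) := by
    rw [PySem.Dict.getD_eq_get?_getD, hdA, pvA_get?, PySem.Dict.get?_empty,
        pvOptMax_of_ne_nil _ hne, hGv]
    rfl
  simp [Function.comp, hval]

-- ===== VERDICT (by name: the statement is the Claim_ definition above) =====
theorem find_highest_versions_spec : Claim_equal_find_highest_versions := by
  intro l _
  exact find_highest_versions_spec' l
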